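-- pv_equiv track=rewrite | github.com/jpatrickpark/breaking_numerical_reasoning_nli | src/utilities/utils.py | same_to_same_plural_number_with_addition
-- ===== SOURCE A (Python) =====
-- convert_dict = {
--     'a':1,
--     'an':1,
--     'one':1,
--     'two':2,
--     'three':3,
--     'four':4,
--     'five':5,
--     'six':6,
--     'seven':7,
--     'eight':8,
--     'nine':9,
--     'ten':10,
--     '1':1,
--     '2':2,
--     '3':3,
--     '4':4,
--     '5':5,
--     '6':6,
--     '7':7,
--     '8':8,
--     '9':9,
--     '10':10
-- }
--
-- reverse_convert_dict = {
--     1:'one',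
--     2:'two',
--     3:'three',
--     4:'four',
--     5:'five',
--     6:'six',
--     7:'seven',
--     8:'eight',
--     9:'nine',
--     10:'ten',
-- }
--
-- def return_sent_words_replaced_case_sensitive(sent, word_to_be_replaced, word_to_use):
--     words_list = sent.strip().split()
--     words_list[words_list.index(word_to_be_replaced)] = word_to_use
--     return " ".join(words_list)
--
-- def return_same_num_pairs(more_first=False,include_1=False, bias=0):
--     num_list = [2,3,4,5,6,7,8,9,10]
--     if include_1:
--         num_list.append(1)
--     result = []
--     for i in num_list:
--         for j in num_list:
--             if more_first:
--                 if i == j + bias: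
--                     result.append((i,j))
--             else:
--                 if i + bias == j:
--                     result.append((i,j))
--     return result
--
-- def num_pair_to_4_possible_mix(pair):
--     n1, n2 = pair
--     return (str(n1), str(n2)), (str(n1), reverse_convert_dict[n2]), (reverse_convert_dict[n1], str(n2)), (reverse_convert_dict[n1], reverse_convert_dict[n2])
--
-- def same_to_same_plural_number_with_addition(sentence_pair, num_words_to_replace, bias, more_in_premise):
--     entailment_addition_same_example = []
--     for pair in return_same_num_pairs(more_in_premise,bias=bias):
--         if pair[0] == convert_dict[num_words_to_replace[0].lower()] and \
--            pair[1] == convert_dict[num_words_to_replace[1].lower()]: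
--             continue
--         for possible_pair in num_pair_to_4_possible_mix(pair):
--             entailment_addition_same_example.append(
--                 (
--                     return_sent_words_replaced_case_sensitive(
--                         sentence_pair[0],
--                         num_words_to_replace[0],
--                         possible_pair[0].capitalize() if num_words_to_replace[0][0].isupper() else possible_pair[0]
--                     ),
--                     return_sent_words_replaced_case_sensitive(
--                         sentence_pair[1],
--                         num_words_to_replace[1],
--                         possible_pair[1].capitalize() if num_words_to_replace[1][0].isupper() else possible_pair[1]
--                     )
--                 )
--             )
--     return entailment_addition_same_example
-- ===== SOURCE B (Python) =====
-- convert_dict = {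
--     'a':1,'an':1,'one':1,'two':2,'three':3,'four':4,'five':5,'six':6,'seven':7,
--     'eight':8,'nine':9,'ten':10,'1':1,'2':2,'3':3,'4':4,'5':5,'6':6,'7':7,'8':8,'9':9,'10':10
-- }
--
-- reverse_convert_dict = {1:'one',2:'two',3:'three',4:'four',5:'five',6:'six',7:'seven',8:'eight',9:'nine',10:'ten'}
--
-- def same_to_same_plural_number_with_addition(sentence_pair, num_words_to_replace, bias, more_in_premise):
--     # single pass: for each i the unique partner j; membership in the fixed set
--     S = {2, 3, 4, 5, 6, 7, 8, 9, 10}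
--     pairs = []
--     for i in range(2, 11):
--         j = i - bias if more_in_premise else i + bias
--         if j in S:
--             pairs.append((i, j))
--     if not pairs:
--         return []
--     k0 = convert_dict.get(num_words_to_replace[0].lower())
--     k1 = convert_dict.get(num_words_to_replace[1].lower())
--     survivors = [p for p in pairs if p != (k0, k1)]
--     if not survivors:
--         return []
--     # tokenize and locate the word to replace once, not per generated pair
--     toks0 = sentence_pair[0].strip().split()
--     toks1 = sentence_pair[1].strip().split()
--     i0 = toks0.index(num_words_to_replace[0])
--     i1 = toks1.index(num_words_to_replace[1])
--     up0 = num_words_to_replace[0][0].isupper()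
--     up1 = num_words_to_replace[1][0].isupper()
--     out = []
--     for (n1, n2) in survivors:
--         for w0, w1 in ((str(n1), str(n2)), (str(n1), reverse_convert_dict[n2]),
--                        (reverse_convert_dict[n1], str(n2)),
--                        (reverse_convert_dict[n1], reverse_convert_dict[n2])):
--             a = w0.capitalize() if up0 else w0
--             b = w1.capitalize() if up1 else w1
--             out.append((" ".join(toks0[:i0] + [a] + toks0[i0 + 1:]),
--                         " ".join(toks1[:i1] + [b] + toks1[i1 + 1:])))
--     return out
-- ===== Notes on version B (the rewrite author's own statement) =====
-- stated objective: alternative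
-- what changed: B replaces A's nested 9x9 pair-generation loop with a single pass computing each number's unique partner and checking set membership, and hoists the per-output-sentence tokenize/strip/index work (which A redoes for every one of the 4*pairs generated sentences) out of the loop, building each output by one precomputed index splice.
import Mathlib
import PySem

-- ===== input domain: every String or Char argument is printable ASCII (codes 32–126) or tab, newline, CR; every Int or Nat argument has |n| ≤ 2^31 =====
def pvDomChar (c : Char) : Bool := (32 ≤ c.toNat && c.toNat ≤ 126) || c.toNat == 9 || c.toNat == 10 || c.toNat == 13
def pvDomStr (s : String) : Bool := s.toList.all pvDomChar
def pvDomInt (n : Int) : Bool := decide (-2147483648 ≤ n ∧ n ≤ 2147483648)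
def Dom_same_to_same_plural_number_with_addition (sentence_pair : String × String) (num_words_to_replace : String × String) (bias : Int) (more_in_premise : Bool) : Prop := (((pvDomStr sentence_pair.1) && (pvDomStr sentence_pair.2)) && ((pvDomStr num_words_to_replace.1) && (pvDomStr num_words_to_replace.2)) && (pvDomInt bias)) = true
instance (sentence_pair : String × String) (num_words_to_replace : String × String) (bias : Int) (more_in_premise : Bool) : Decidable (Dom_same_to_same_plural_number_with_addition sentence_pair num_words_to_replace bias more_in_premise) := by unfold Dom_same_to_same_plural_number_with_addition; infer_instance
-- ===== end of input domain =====

-- B makes a single pass computing each number's unique partner (instead of A's nested double loop)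
-- and tokenizes/locates the word to replace once (instead of per generated sentence); return-value
-- equivalence is proved on Pre_, which excludes exactly the inputs where the Python A raises.

-- ===== PORT A =====

-- module-level constant dicts, shared by both ports
def convertDict : PySem.Dict String Int := PySem.Dict.ofList
  [("a",1),("an",1),("one",1),("two",2),("three",3),("four",4),("five",5),("six",6),
   ("seven",7),("eight",8),("nine",9),("ten",10),("1",1),("2",2),("3",3),("4",4),
   ("5",5),("6",6),("7",7),("8",8),("9",9),("10",10)]

def reverseConvertDict : PySem.Dict Int String := PySem.Dict.ofList
  [(1,"one"),(2,"two"),(3,"three"),(4,"four"),(5,"five"),(6,"six"),(7,"seven"),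
   (8,"eight"),(9,"nine"),(10,"ten")]

-- str.capitalize, hand-ported (exact for ASCII strings, the only arguments it receives here)
def pyCapitalize (s : String) : String :=
  match s.toList with
  | [] => ""
  | c :: rest => String.ofList (PySem.Chars.upperChar c :: PySem.Chars.lower rest)

-- words_list[words_list.index(w)] = v; Python raises ValueError when w is absent (excluded by Pre_)
def return_sent_words_replaced_case_sensitive (sent word_to_be_replaced word_to_use : String) : String :=
  let words_list := PySem.Str.split₀ (PySem.Str.strip sent)
  let i := (PySem.List.index? words_list word_to_be_replaced).getD 0
  PySem.Str.join " " (words_list.set i word_to_use)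

def return_same_num_pairs (more_first : Bool) (include_1 : Bool) (bias : Int) : List (Int × Int) :=
  let num_list : List Int := if include_1 then [2,3,4,5,6,7,8,9,10,1] else [2,3,4,5,6,7,8,9,10]
  num_list.foldl (fun result i =>
    num_list.foldl (fun result j =>
      if more_first then
        (if i = j + bias then result ++ [(i,j)] else result)
      else
        (if i + bias = j then result ++ [(i,j)] else result)) result) []

-- reverse_convert_dict[n] never misses here (n ∈ 2..10); getD "" marks the impossible KeyError
def num_pair_to_4_possible_mix (pair : Int × Int) : List (String × String) :=
  [(PySem.Int.toStr pair.1, PySem.Int.toStr pair.2),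
   (PySem.Int.toStr pair.1, (reverseConvertDict.get? pair.2).getD ""),
   ((reverseConvertDict.get? pair.1).getD "", PySem.Int.toStr pair.2),
   ((reverseConvertDict.get? pair.1).getD "", (reverseConvertDict.get? pair.2).getD "")]

-- convert_dict[w] (KeyError) and w[0] (IndexError) are getD-defaulted; Pre_ excludes the raising inputs
def same_to_same_plural_number_with_addition (sentence_pair : String × String) (num_words_to_replace : String × String) (bias : Int) (more_in_premise : Bool) : List (String × String) :=
  (return_same_num_pairs more_in_premise false bias).foldl (fun acc pair =>
    if pair.1 = (convertDict.get? (PySem.Str.lower num_words_to_replace.1)).getD 0 ∧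
       pair.2 = (convertDict.get? (PySem.Str.lower num_words_to_replace.2)).getD 0 then acc
    else
      (num_pair_to_4_possible_mix pair).foldl (fun acc possible_pair =>
        acc ++ [(return_sent_words_replaced_case_sensitive sentence_pair.1 num_words_to_replace.1
                   (if PySem.Chars.isupper ((PySem.Str.pyGet? num_words_to_replace.1 0).getD ' ')
                    then pyCapitalize possible_pair.1 else possible_pair.1),
                 return_sent_words_replaced_case_sensitive sentence_pair.2 num_words_to_replace.2
                   (if PySem.Chars.isupper ((PySem.Str.pyGet? num_words_to_replace.2 0).getD ' ')
                    then pyCapitalize possible_pair.2 else possible_pair.2))]) acc) []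

-- ===== PORT B =====

def same_to_same_plural_number_with_addition_alt (sentence_pair : String × String) (num_words_to_replace : String × String) (bias : Int) (more_in_premise : Bool) : List (String × String) :=
  let S : PySem.Set Int := PySem.Set.ofList [2,3,4,5,6,7,8,9,10]
  let pairs := (PySem.List.pyRange 2 11 1).foldl (fun ps i =>
    let j := if more_in_premise then i - bias else i + bias
    if S.contains j then ps ++ [(i, j)] else ps) []
  if pairs = [] then []
  else
    let k0 := convertDict.get? (PySem.Str.lower num_words_to_replace.1)
    let k1 := convertDict.get? (PySem.Str.lower num_words_to_replace.2)
    let survivors := pairs.filter (fun p => decide ((some p.1, some p.2) ≠ (k0, k1)))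
    if survivors = [] then []
    else
      let toks0 := PySem.Str.split₀ (PySem.Str.strip sentence_pair.1)
      let toks1 := PySem.Str.split₀ (PySem.Str.strip sentence_pair.2)
      let i0 := (PySem.List.index? toks0 num_words_to_replace.1).getD 0
      let i1 := (PySem.List.index? toks1 num_words_to_replace.2).getD 0
      let up0 := PySem.Chars.isupper ((PySem.Str.pyGet? num_words_to_replace.1 0).getD ' ')
      let up1 := PySem.Chars.isupper ((PySem.Str.pyGet? num_words_to_replace.2 0).getD ' ')
      survivors.foldl (fun out p =>
        [(PySem.Int.toStr p.1, PySem.Int.toStr p.2),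
         (PySem.Int.toStr p.1, (reverseConvertDict.get? p.2).getD ""),
         ((reverseConvertDict.get? p.1).getD "", PySem.Int.toStr p.2),
         ((reverseConvertDict.get? p.1).getD "", (reverseConvertDict.get? p.2).getD "")].foldl
          (fun out q =>
            let a := if up0 then pyCapitalize q.1 else q.1
            let b := if up1 then pyCapitalize q.2 else q.2
            out ++ [(PySem.Str.join " " (toks0.take i0 ++ [a] ++ toks0.drop (i0 + 1)),
                     PySem.Str.join " " (toks1.take i1 ++ [b] ++ toks1.drop (i1 + 1)))]) out) []

-- ===== PRECONDITION & SPEC =====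

-- Pre_ excludes exactly the inputs where the Python A raises: when any pairs exist (|bias| ≤ 8),
-- the first word must be a convert_dict key (else KeyError); the second word must be a key whenever
-- the short-circuited 'and' reaches its lookup (else KeyError); and when at least one pair survives
-- the skip, both words must occur as tokens of their sentence (else list.index raises ValueError).
def Pre_same_to_same_plural_number_with_addition (sentence_pair : String × String) (num_words_to_replace : String × String) (bias : Int) (more_in_premise : Bool) : Prop :=
  (-8 ≤ bias ∧ bias ≤ 8) →
    ((convertDict.get? (PySem.Str.lower num_words_to_replace.1)).isSome = true ∧
     (let k0 := (convertDict.get? (PySem.Str.lower num_words_to_replace.1)).getD 0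
      let j0 := if more_in_premise then k0 - bias else k0 + bias
      ((2 ≤ k0 ∧ k0 ≤ 10 ∧ 2 ≤ j0 ∧ j0 ≤ 10) →
        (convertDict.get? (PySem.Str.lower num_words_to_replace.2)).isSome = true) ∧
      (¬((bias = 8 ∨ bias = -8) ∧ 2 ≤ k0 ∧ k0 ≤ 10 ∧ 2 ≤ j0 ∧ j0 ≤ 10 ∧
         convertDict.get? (PySem.Str.lower num_words_to_replace.2) = some j0) →
        num_words_to_replace.1 ∈ PySem.Str.split₀ (PySem.Str.strip sentence_pair.1) ∧
        num_words_to_replace.2 ∈ PySem.Str.split₀ (PySem.Str.strip sentence_pair.2))))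
instance (sentence_pair : String × String) (num_words_to_replace : String × String) (bias : Int) (more_in_premise : Bool) : Decidable (Pre_same_to_same_plural_number_with_addition sentence_pair num_words_to_replace bias more_in_premise) := by unfold Pre_same_to_same_plural_number_with_addition; infer_instance

def pvWitness_same_to_same_plural_number_with_addition : (String × String) × (String × String) × Int × Bool :=
  (("two cats sleep", "three dogs run"), ("two", "three"), 1, false)

def Spec_same_to_same_plural_number_with_addition (sentence_pair : String × String) (num_words_to_replace : String × String) (bias : Int) (more_in_premise : Bool) (out : List (String × String)) : Prop := out = same_to_same_plural_number_with_addition_alt sentence_pair num_words_to_replace bias more_in_premise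
instance (sentence_pair : String × String) (num_words_to_replace : String × String) (bias : Int) (more_in_premise : Bool) (out : List (String × String)) : Decidable (Spec_same_to_same_plural_number_with_addition sentence_pair num_words_to_replace bias more_in_premise out) := by unfold Spec_same_to_same_plural_number_with_addition; infer_instance

-- ===== CLAIM (what is proved, stated in full; the proofs are below) =====
def Claim_equal_same_to_same_plural_number_with_addition : Prop := ∀ (sentence_pair : String × String) (num_words_to_replace : String × String) (bias : Int) (more_in_premise : Bool), Dom_same_to_same_plural_number_with_addition sentence_pair num_words_to_replace bias more_in_premise → Pre_same_to_same_plural_number_with_addition sentence_pair num_words_to_replace bias more_in_premise → Spec_same_to_same_plural_number_with_addition sentence_pair num_words_to_replace bias more_in_premise (same_to_same_plural_number_with_addition sentence_pair num_words_to_replace bias more_in_premise)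

-- ===== LEMMAS AND PROOFS =====

-- canonical pair list both generators are proved equal to
def canonPairs (bias : Int) (more : Bool) : List (Int × Int) :=
  ([2,3,4,5,6,7,8,9,10] : List Int).flatMap (fun i =>
    let j := if more then i - bias else i + bias
    if 2 ≤ j ∧ j ≤ 10 then [(i, j)] else [])




theorem inner_fold (ptr : Int) (i : Int) (r : List (Int × Int)) :
    ([2,3,4,5,6,7,8,9,10] : List Int).foldl (fun r j => if ptr = j then r ++ [(i,j)] else r) r
    = r ++ (if 2 ≤ ptr ∧ ptr ≤ 10 then [(i, ptr)] else []) := by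
  by_cases h : 2 ≤ ptr ∧ ptr ≤ 10
  · obtain ⟨h1, h2⟩ := h
    interval_cases ptr <;> norm_num [List.foldl]
  · simp only [List.foldl_cons, List.foldl_nil]
    rw [if_neg (by omega : ¬ptr = (2:Int)), if_neg (by omega : ¬ptr = (3:Int)),
        if_neg (by omega : ¬ptr = (4:Int)), if_neg (by omega : ¬ptr = (5:Int)),
        if_neg (by omega : ¬ptr = (6:Int)), if_neg (by omega : ¬ptr = (7:Int)),
        if_neg (by omega : ¬ptr = (8:Int)), if_neg (by omega : ¬ptr = (9:Int)),
        if_neg (by omega : ¬ptr = (10:Int)), if_neg h]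
    simp

theorem pairsA_eq_canon (bias : Int) (more : Bool) :
    return_same_num_pairs more false bias = canonPairs bias more := by
  unfold return_same_num_pairs
  cases more
  · simp only [Bool.false_eq_true, if_false]
    have hb : (fun (result : List (Int × Int)) (i : Int) =>
        ([2,3,4,5,6,7,8,9,10] : List Int).foldl (fun result j =>
          if i + bias = j then result ++ [(i,j)] else result) result)
        = (fun result i => result ++ (if 2 ≤ i + bias ∧ i + bias ≤ 10 then [(i, i + bias)] else [])) := by
      funext r i; exact inner_fold (i + bias) i r
    rw [hb, PySem.List.foldl_append_eq_flatMap]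
    simp [canonPairs]
  · simp only [Bool.false_eq_true, if_false, if_pos trivial]
    have hb : (fun (result : List (Int × Int)) (i : Int) =>
        ([2,3,4,5,6,7,8,9,10] : List Int).foldl (fun result j =>
          if i = j + bias then result ++ [(i,j)] else result) result)
        = (fun result i => result ++ (if 2 ≤ i - bias ∧ i - bias ≤ 10 then [(i, i - bias)] else [])) := by
      funext r i
      have : (fun (result : List (Int × Int)) (j : Int) => if i = j + bias then result ++ [(i,j)] else result)
           = (fun result j => if i - bias = j then result ++ [(i,j)] else result) := by
        funext r j
        by_cases h : i = j + bias
        · rw [if_pos h, if_pos (by omega)]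
        · rw [if_neg h, if_neg (by omega)]
      rw [this]; exact inner_fold (i - bias) i r
    rw [hb, PySem.List.foldl_append_eq_flatMap]
    simp [canonPairs]

theorem pairsB_eq_canon (bias : Int) (more : Bool) :
    ((PySem.List.pyRange 2 11 1).foldl (fun ps i =>
      let j := if more then i - bias else i + bias
      if (PySem.Set.ofList ([2,3,4,5,6,7,8,9,10] : List Int)).contains j then ps ++ [(i, j)] else ps) [])
    = canonPairs bias more := by
  have hr : PySem.List.pyRange 2 11 1 = ([2,3,4,5,6,7,8,9,10] : List Int) := by decide
  have hc : ∀ j : Int, ((PySem.Set.ofList ([2,3,4,5,6,7,8,9,10] : List Int)).contains j) = decide (2 ≤ j ∧ j ≤ 10) := by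
    intro j
    by_cases h : 2 ≤ j ∧ j ≤ 10
    · obtain ⟨h1, h2⟩ := h
      interval_cases j <;> decide
    · have hm : j ∉ ([2,3,4,5,6,7,8,9,10] : List Int) := by
        intro hmem; simp at hmem; omega
      have hs : (PySem.Set.ofList ([2,3,4,5,6,7,8,9,10] : List Int)) = ([2,3,4,5,6,7,8,9,10] : List Int) := by decide
      rw [hs, decide_eq_false h]
      simp [hm]
  have hb : (fun (ps : List (Int × Int)) (i : Int) =>
      let j := if more then i - bias else i + bias
      if (PySem.Set.ofList ([2,3,4,5,6,7,8,9,10] : List Int)).contains j then ps ++ [(i, j)] else ps)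
      = (fun ps i =>
        ps ++ (let j := if more then i - bias else i + bias
               if 2 ≤ j ∧ j ≤ 10 then [(i, j)] else [])) := by
    funext ps i
    simp only [hc]
    by_cases h : 2 ≤ (if more then i - bias else i + bias) ∧ (if more then i - bias else i + bias) ≤ 10
    · simp [h]
    · simp [h]
  rw [hr, hb, PySem.List.foldl_append_eq_flatMap]
  rfl

theorem mem_canonPairs {bias : Int} {more : Bool} {p : Int × Int} (hp : p ∈ canonPairs bias more) :
    2 ≤ p.1 ∧ p.1 ≤ 10 ∧ 2 ≤ p.2 ∧ p.2 ≤ 10 ∧ p.2 = (if more then p.1 - bias else p.1 + bias) := by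
  unfold canonPairs at hp
  rw [List.mem_flatMap] at hp
  obtain ⟨i, hi, hm⟩ := hp
  have hi' : 2 ≤ i ∧ i ≤ 10 := by simp at hi; omega
  cases more <;> simp only [Bool.false_eq_true, if_false, if_pos trivial] at hm ⊢ <;>
    split at hm <;> simp only [List.mem_singleton, List.not_mem_nil] at hm
  · obtain rfl := hm; rename_i h; simp; omega
  · obtain rfl := hm; rename_i h; simp; omega

-- A's per-pair emission, as a function (A's loop body after the skip)
def gA (sp nw : String × String) (pair : Int × Int) : List (String × String) :=
  (num_pair_to_4_possible_mix pair).map (fun pp =>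
    (return_sent_words_replaced_case_sensitive sp.1 nw.1
       (if PySem.Chars.isupper ((PySem.Str.pyGet? nw.1 0).getD ' ') then pyCapitalize pp.1 else pp.1),
     return_sent_words_replaced_case_sensitive sp.2 nw.2
       (if PySem.Chars.isupper ((PySem.Str.pyGet? nw.2 0).getD ' ') then pyCapitalize pp.2 else pp.2)))

theorem flatMap_if_filter {α β : Type} (c : α → Prop) [DecidablePred c] (g : α → List β) (l : List α) :
    l.flatMap (fun p => if c p then [] else g p) = (l.filter (fun p => decide (¬ c p))).flatMap g := by
  induction l with
  | nil => simp
  | cons h t ih => by_cases hc : c h <;> simp [hc, ih]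

theorem skip_iff (k0 k1 : Option Int) {a b : Int} (ha : 2 ≤ a) (hb : 2 ≤ b) :
    (a = k0.getD 0 ∧ b = k1.getD 0) ↔ (some a, some b) = (k0, k1) := by
  cases k0 <;> cases k1 <;> simp <;> omega

theorem formA (sp nw : String × String) (bias : Int) (more : Bool) :
    same_to_same_plural_number_with_addition sp nw bias more
    = ((canonPairs bias more).filter (fun p =>
        decide ((some p.1, some p.2) ≠ (convertDict.get? (PySem.Str.lower nw.1),
                                        convertDict.get? (PySem.Str.lower nw.2))))).flatMap (gA sp nw) := by
  unfold same_to_same_plural_number_with_addition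
  rw [pairsA_eq_canon]
  have hbody : (fun (acc : List (String × String)) (pair : Int × Int) =>
      if pair.1 = (convertDict.get? (PySem.Str.lower nw.1)).getD 0 ∧
         pair.2 = (convertDict.get? (PySem.Str.lower nw.2)).getD 0 then acc
      else
        (num_pair_to_4_possible_mix pair).foldl (fun acc possible_pair =>
          acc ++ [(return_sent_words_replaced_case_sensitive sp.1 nw.1
                     (if PySem.Chars.isupper ((PySem.Str.pyGet? nw.1 0).getD ' ')
                      then pyCapitalize possible_pair.1 else possible_pair.1),
                   return_sent_words_replaced_case_sensitive sp.2 nw.2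
                     (if PySem.Chars.isupper ((PySem.Str.pyGet? nw.2 0).getD ' ')
                      then pyCapitalize possible_pair.2 else possible_pair.2))]) acc)
      = (fun acc pair => acc ++
          (if pair.1 = (convertDict.get? (PySem.Str.lower nw.1)).getD 0 ∧
              pair.2 = (convertDict.get? (PySem.Str.lower nw.2)).getD 0 then []
           else gA sp nw pair)) := by
    funext acc pair
    rw [PySem.List.foldl_append_singleton_eq_map]
    by_cases h : pair.1 = (convertDict.get? (PySem.Str.lower nw.1)).getD 0 ∧
                 pair.2 = (convertDict.get? (PySem.Str.lower nw.2)).getD 0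
    · simp [h]
    · simp [h]; rfl
  rw [hbody, PySem.List.foldl_append_eq_flatMap, List.nil_append]
  rw [List.flatMap_congr (g := fun pair =>
      if (some pair.1, some pair.2) = (convertDict.get? (PySem.Str.lower nw.1),
                                       convertDict.get? (PySem.Str.lower nw.2)) then []
      else gA sp nw pair)
    (fun p hp => by
      have hb := mem_canonPairs hp
      rw [if_congr (skip_iff _ _ hb.1 hb.2.2.1) rfl rfl])]
  exact flatMap_if_filter _ _ _

theorem replace_eq (s w v : String)
    (hw : w ∈ PySem.Str.split₀ (PySem.Str.strip s)) :
    return_sent_words_replaced_case_sensitive s w v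
    = PySem.Str.join " " ((PySem.Str.split₀ (PySem.Str.strip s)).take ((PySem.List.index? (PySem.Str.split₀ (PySem.Str.strip s)) w).getD 0) ++ [v] ++ (PySem.Str.split₀ (PySem.Str.strip s)).drop ((PySem.List.index? (PySem.Str.split₀ (PySem.Str.strip s)) w).getD 0 + 1)) := by
  unfold return_sent_words_replaced_case_sensitive
  obtain ⟨k, hk⟩ := Option.isSome_iff_exists.mp ((PySem.List.index?_isSome_iff _ _).mpr hw)
  obtain ⟨hlt, -, -⟩ := PySem.List.getElem_of_index?_eq_some hk
  simp only [hk, Option.getD_some]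
  rw [List.set_eq_take_cons_drop _ hlt]
  simp

-- ===== VERDICT (by name: the statement is the Claim_ definition above) =====
theorem same_to_same_plural_number_with_addition_spec : Claim_equal_same_to_same_plural_number_with_addition := by
  intro sp nw bias more _hDom hPre
  unfold Spec_same_to_same_plural_number_with_addition
  rw [formA]
  simp only [same_to_same_plural_number_with_addition_alt]
  rw [pairsB_eq_canon]
  by_cases hsnil : (canonPairs bias more).filter (fun p =>
      decide ((some p.1, some p.2) ≠ (convertDict.get? (PySem.Str.lower nw.1),
                                      convertDict.get? (PySem.Str.lower nw.2)))) = []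
  · rw [hsnil]
    by_cases hp : canonPairs bias more = [] <;> simp [hp]
  · have hpne : canonPairs bias more ≠ [] := by
      intro h
      exact hsnil (by rw [h]; rfl)
    rw [if_neg hpne, if_neg hsnil]
    obtain ⟨p0, hp0⟩ := List.exists_mem_of_ne_nil _ hsnil
    have hp0c : p0 ∈ canonPairs bias more := List.mem_of_mem_filter hp0
    have hb := mem_canonPairs hp0c
    have hbias : -8 ≤ bias ∧ bias ≤ 8 := by
      obtain ⟨h1, h2, h3, h4, h5⟩ := hb
      cases more <;> simp at h5 <;> omega
    obtain ⟨hk0s, hk1cond, htokcond⟩ := hPre hbias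
    obtain ⟨k0v, hk0v⟩ := Option.isSome_iff_exists.mp hk0s
    have htok := htokcond (by
      intro hbig
      rw [hk0v] at hbig
      simp only [Option.getD_some] at hbig
      obtain ⟨hb8, hA, hB, hC, hD, hk1v⟩ := hbig
      apply hsnil
      rcases hb8 with rfl | rfl <;> cases more <;>
        simp only [Bool.false_eq_true, if_false, if_pos trivial] at hC hD hk1v
      · have hv : k0v = 2 := by omega
        subst hv
        norm_num at hk1v
        rw [hk0v, hk1v, show canonPairs 8 false = [(2,10)] from by decide]
        decide
      · have hv : k0v = 10 := by omega
        subst hv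
        norm_num at hk1v
        rw [hk0v, hk1v, show canonPairs 8 true = [(10,2)] from by decide]
        decide
      · have hv : k0v = 10 := by omega
        subst hv
        norm_num at hk1v
        rw [hk0v, hk1v, show canonPairs (-8) false = [(10,2)] from by decide]
        decide
      · have hv : k0v = 2 := by omega
        subst hv
        norm_num at hk1v
        rw [hk0v, hk1v, show canonPairs (-8) true = [(2,10)] from by decide]
        decide)
    have hinner : (fun (out : List (String × String)) (p : Int × Int) =>
        List.foldl
          (fun out q =>
            out ++
              [(PySem.Str.join " "
            (List.take ((PySem.List.index? (PySem.Str.split₀ (PySem.Str.strip sp.1)) nw.1).getD 0)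
                  (PySem.Str.split₀ (PySem.Str.strip sp.1)) ++
                [if PySem.Chars.isupper ((PySem.Str.pyGet? nw.1 0).getD ' ') = true then pyCapitalize q.1
                  else q.1] ++
              List.drop ((PySem.List.index? (PySem.Str.split₀ (PySem.Str.strip sp.1)) nw.1).getD 0 + 1)
                (PySem.Str.split₀ (PySem.Str.strip sp.1))),
                  PySem.Str.join " "
            (List.take ((PySem.List.index? (PySem.Str.split₀ (PySem.Str.strip sp.2)) nw.2).getD 0)
                  (PySem.Str.split₀ (PySem.Str.strip sp.2)) ++
                [if PySem.Chars.isupper ((PySem.Str.pyGet? nw.2 0).getD ' ') = true then pyCapitalize q.2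
                  else q.2] ++
              List.drop ((PySem.List.index? (PySem.Str.split₀ (PySem.Str.strip sp.2)) nw.2).getD 0 + 1)
                (PySem.Str.split₀ (PySem.Str.strip sp.2))))])
          out
          [(PySem.Int.toStr p.1, PySem.Int.toStr p.2), (PySem.Int.toStr p.1, (reverseConvertDict.get? p.2).getD ""),
            ((reverseConvertDict.get? p.1).getD "", PySem.Int.toStr p.2),
            ((reverseConvertDict.get? p.1).getD "", (reverseConvertDict.get? p.2).getD "")])
        = fun out p => out ++
          ([(PySem.Int.toStr p.1, PySem.Int.toStr p.2), (PySem.Int.toStr p.1, (reverseConvertDict.get? p.2).getD ""),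
            ((reverseConvertDict.get? p.1).getD "", PySem.Int.toStr p.2),
            ((reverseConvertDict.get? p.1).getD "", (reverseConvertDict.get? p.2).getD "")]).map (fun q =>
            (PySem.Str.join " "
            (List.take ((PySem.List.index? (PySem.Str.split₀ (PySem.Str.strip sp.1)) nw.1).getD 0)
                  (PySem.Str.split₀ (PySem.Str.strip sp.1)) ++
                [if PySem.Chars.isupper ((PySem.Str.pyGet? nw.1 0).getD ' ') = true then pyCapitalize q.1
                  else q.1] ++
              List.drop ((PySem.List.index? (PySem.Str.split₀ (PySem.Str.strip sp.1)) nw.1).getD 0 + 1)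
                (PySem.Str.split₀ (PySem.Str.strip sp.1))),
                  PySem.Str.join " "
            (List.take ((PySem.List.index? (PySem.Str.split₀ (PySem.Str.strip sp.2)) nw.2).getD 0)
                  (PySem.Str.split₀ (PySem.Str.strip sp.2)) ++
                [if PySem.Chars.isupper ((PySem.Str.pyGet? nw.2 0).getD ' ') = true then pyCapitalize q.2
                  else q.2] ++
              List.drop ((PySem.List.index? (PySem.Str.split₀ (PySem.Str.strip sp.2)) nw.2).getD 0 + 1)
                (PySem.Str.split₀ (PySem.Str.strip sp.2))))) := by
      funext out p
      exact PySem.List.foldl_append_singleton_eq_map _ _ _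
    rw [hinner, PySem.List.foldl_append_eq_flatMap, List.nil_append]
    apply List.flatMap_congr
    intro p _hp
    unfold gA num_pair_to_4_possible_mix
    apply List.map_congr_left
    intro q _hq
    rw [replace_eq sp.1 nw.1 _ htok.1, replace_eq sp.2 nw.2 _ htok.2]
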